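-- pv_equiv track=rewrite | github.com/areumsim/code_test | coding_test_6_C/c1.py | solution
-- ===== SOURCE A (Python) =====
-- from math import gcd
-- from collections import Counter
--
-- def get_direction(x, y):
--     g = gcd(x, y)
--     return (x // g, y // g)
--
-- def solution(monsters, bullets):
--     bullet_directions = Counter(get_direction(x, y) for x, y in bullets)
--     monster_directions = Counter(get_direction(x, y) for x, y in monsters)
--
--     removed = 0
--     for direction, m_count in monster_directions.items():
--         b_count = bullet_directions[direction]
--         # 같은 방향에 있는 몬스터와 총알의 수를 비교하여, 최소한의 수를 총알로 제거 가능한 몬스터 수로 산정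
--         removed += min(b_count, m_count)
--
--     if removed == 0:
--         return -1
--     return removed
-- ===== SOURCE B (Python) =====
-- from math import gcd
--
-- def get_direction(x, y):
--     g = gcd(x, y)
--     return (x // g, y // g)
--
-- def solution(monsters, bullets):
--     remaining = [get_direction(x, y) for x, y in bullets]
--     removed = 0
--     for x, y in monsters:
--         d = get_direction(x, y)
--         if d in remaining:
--             remaining.remove(d)
--             removed += 1
--     return removed if removed else -1
-- ===== Notes on version B (the rewrite author's own statement) =====
-- stated objective: alternative
-- what changed: Replaces the two Counters and the per-direction min-of-counts sum by a greedy one-pass matching: each monster consumes one same-direction bullet from a mutable remaining list, counting successful removals (equal because the greedy match size is the multiset intersection, whose cardinality is the sum over directions of min counts).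
import Mathlib
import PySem

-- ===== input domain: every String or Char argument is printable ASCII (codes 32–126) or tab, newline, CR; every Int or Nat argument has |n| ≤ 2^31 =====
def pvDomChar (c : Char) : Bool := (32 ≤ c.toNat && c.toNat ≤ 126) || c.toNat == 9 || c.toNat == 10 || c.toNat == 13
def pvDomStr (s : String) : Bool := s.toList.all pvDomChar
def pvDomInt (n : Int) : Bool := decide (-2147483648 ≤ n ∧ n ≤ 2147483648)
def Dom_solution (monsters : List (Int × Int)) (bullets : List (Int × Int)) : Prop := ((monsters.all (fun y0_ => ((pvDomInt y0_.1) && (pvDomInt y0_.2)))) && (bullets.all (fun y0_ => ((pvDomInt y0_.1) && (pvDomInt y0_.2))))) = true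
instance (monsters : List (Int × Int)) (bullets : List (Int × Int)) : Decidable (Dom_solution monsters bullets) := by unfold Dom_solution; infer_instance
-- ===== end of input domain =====

-- B replaces A's Counter/min-of-counts sum by a greedy one-pass matching that lets each
-- monster consume one same-direction bullet from a mutable remaining list (objective: alternative).

-- ===== PORT A =====
-- shared helper get_direction (identical in Source A and Source B): gcd then '//'
def getDirection (x y : Int) : Int × Int :=
  let g : Int := (Int.gcd x y : Int)
  (PySem.Int.floordiv x g, PySem.Int.floordiv y g)

def solution (monsters : List (Int × Int)) (bullets : List (Int × Int)) : Int :=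
  let bulletDirections := PySem.Dict.counter (bullets.map (fun p => getDirection p.1 p.2))
  let monsterDirections := PySem.Dict.counter (monsters.map (fun p => getDirection p.1 p.2))
  let removed : Int :=
    monsterDirections.items.foldl
      (fun removed dm => removed + min (bulletDirections.getD dm.1 0) dm.2) 0
  if removed = 0 then -1 else removed

-- ===== PORT B =====
-- 'remaining.remove(d)' is only executed under the 'd in remaining' guard, where Python's
-- list.remove is exactly List.erase (removes the first occurrence).
def solution_alt (monsters : List (Int × Int)) (bullets : List (Int × Int)) : Int :=
  let remaining := bullets.map (fun p => getDirection p.1 p.2)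
  let st := monsters.foldl
    (fun (st : List (Int × Int) × Int) p =>
      let d := getDirection p.1 p.2
      if d ∈ st.1 then (st.1.erase d, st.2 + 1) else st)
    (remaining, 0)
  if st.2 = 0 then -1 else st.2

-- ===== PRECONDITION & SPEC =====
-- Pre_ excludes inputs containing the zero vector (0, 0): there get_direction divides by
-- gcd(0, 0) = 0 and both Pythons raise ZeroDivisionError.
def Pre_solution (monsters : List (Int × Int)) (bullets : List (Int × Int)) : Prop :=
  (∀ p ∈ monsters, p ≠ ((0 : Int), (0 : Int))) ∧ (∀ p ∈ bullets, p ≠ ((0 : Int), (0 : Int)))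
instance (monsters : List (Int × Int)) (bullets : List (Int × Int)) : Decidable (Pre_solution monsters bullets) := by unfold Pre_solution; infer_instance

def pvWitness_solution : (List (Int × Int)) × (List (Int × Int)) :=
  ([(2, 4), (1, 2), (3, -1)], [(1, 2), (1, 2), (3, 1)])

def Spec_solution (monsters : List (Int × Int)) (bullets : List (Int × Int)) (out : Int) : Prop := out = solution_alt monsters bullets
instance (monsters : List (Int × Int)) (bullets : List (Int × Int)) (out : Int) : Decidable (Spec_solution monsters bullets out) := by unfold Spec_solution; infer_instance

-- ===== CLAIM (what is proved, stated in full; the proofs are below) =====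
def Claim_equal_solution : Prop := ∀ (monsters : List (Int × Int)) (bullets : List (Int × Int)), Dom_solution monsters bullets → Pre_solution monsters bullets → Spec_solution monsters bullets (solution monsters bullets)

-- ===== LEMMAS AND PROOFS =====

-- folding '+ f x' over a list from 0 is the sum of the mapped list
theorem foldl_add_eq_sum_map {α : Type} (l : List α) (f : α → Int) (a : Int) :
    l.foldl (fun acc x => acc + f x) a = a + (l.map f).sum := by
  induction l generalizing a with
  | nil => simp
  | cons x xs ih =>
      simp only [List.foldl_cons, List.map_cons, List.sum_cons, ih]
      ring

-- the two lawful BEq instances on Int × Int (the ports' product instance and the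
-- DecidableEq-derived one Mathlib's lemmas use) are equal
theorem beq_bridge :
    (instBEqProd : BEq (Int × Int)) = @instBEqOfDecidableEq (Int × Int) instDecidableEqProd :=
  lawful_beq_subsingleton _ _

-- count and bagInter at the ports' instance equal their DecidableEq-derived forms
theorem count_bridge (a : Int × Int) (l : List (Int × Int)) :
    @List.count _ instBEqProd a l
      = @List.count _ (@instBEqOfDecidableEq (Int × Int) instDecidableEqProd) a l := by
  rw [beq_bridge]

theorem bagInter_bridge (m b : List (Int × Int)) :
    @List.bagInter _ instBEqProd m b
      = @List.bagInter _ (@instBEqOfDecidableEq (Int × Int) instDecidableEqProd) m b := by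
  rw [beq_bridge]

-- bagInter recursion lemmas at an arbitrary lawful BEq instance
theorem nil_bagInter' {α : Type} [BEq α] (l : List α) : List.bagInter [] l = [] := by
  cases l <;> rfl

theorem bagInter_nil' {α : Type} [BEq α] (l : List α) : List.bagInter l [] = [] := by
  cases l <;> rfl

theorem cons_bagInter_pos' {α : Type} [BEq α] [LawfulBEq α] (a : α) (l₁ l₂ : List α)
    (h : a ∈ l₂) : (a :: l₁).bagInter l₂ = a :: l₁.bagInter (l₂.erase a) := by
  cases l₂ with
  | nil => cases h
  | cons x t => simp [List.bagInter, h]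

theorem cons_bagInter_neg' {α : Type} [BEq α] [LawfulBEq α] (a : α) (l₁ l₂ : List α)
    (h : a ∉ l₂) : (a :: l₁).bagInter l₂ = l₁.bagInter l₂ := by
  cases l₂ with
  | nil => simp [List.bagInter, bagInter_nil']
  | cons x t => simp [List.bagInter, h]

-- B's greedy loop computes the length of the bag intersection of the direction lists
theorem greedy_foldl (m : List (Int × Int)) (f : (Int × Int) → (Int × Int))
    (b : List (Int × Int)) (r : Int) :
    (m.foldl (fun (st : List (Int × Int) × Int) p =>
        if f p ∈ st.1 then (st.1.erase (f p), st.2 + 1) else st) (b, r)).2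
      = r + (((m.map f).bagInter b).length : Int) := by
  induction m generalizing b r with
  | nil => simp [nil_bagInter']
  | cons a m ih =>
    by_cases h : f a ∈ b
    · simp only [List.foldl_cons, if_pos h, ih, List.map_cons,
        cons_bagInter_pos' _ _ _ h, List.length_cons]
      push_cast; ring
    · simp only [List.foldl_cons, if_neg h, ih, List.map_cons,
        cons_bagInter_neg' _ _ _ h]

-- the sum over the distinct elements of m of min counts is the bag-intersection length (ℕ)
theorem sum_min_count_eq_length_bagInter {α : Type} [DecidableEq α] (m b : List α) :
    ∑ a ∈ m.toFinset, min (b.count a) (m.count a) = (m.bagInter b).length := by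
  rw [← List.sum_toFinset_count_eq_length (m.bagInter b)]
  have hsub : (m.bagInter b).toFinset ⊆ m.toFinset := by
    intro a ha
    rw [List.mem_toFinset] at *
    exact (List.mem_bagInter.mp ha).1
  rw [Finset.sum_subset hsub (fun x _ hx => by
    rw [List.count_eq_zero]
    exact fun hmem => hx (List.mem_toFinset.mpr hmem))]
  exact Finset.sum_congr rfl (fun a _ => by rw [List.count_bagInter, Nat.min_comm])

-- the Int version, summed over PySem.Set.ofList, at the ports' instances
theorem sum_min_count_int (m b : List (Int × Int)) :
    ((PySem.Set.ofList m).map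
      (fun d => min ((b.count d : Int)) ((m.count d : Int)))).sum
      = ((m.bagInter b).length : Int) := by
  have hnd : (PySem.Set.ofList m).Nodup := PySem.Set.nodup_ofList m
  rw [← List.sum_toFinset _ hnd]
  have hset : (PySem.Set.ofList m).toFinset = m.toFinset := by
    ext a
    simp [PySem.Set.mem_ofList]
  rw [hset]
  simp only [count_bridge, bagInter_bridge]
  rw [← sum_min_count_eq_length_bagInter m b]
  push_cast
  rfl

-- ===== VERDICT (by name: the statement is the Claim_ definition above) =====
theorem solution_spec : Claim_equal_solution := by
  intro monsters bullets _ _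
  unfold Spec_solution solution solution_alt
  simp only [PySem.Dict.items_counter, PySem.Dict.getD_counter, List.foldl_map,
    foldl_add_eq_sum_map, greedy_foldl]
  rw [sum_min_count_int]
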